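-- pv_equiv track=rewrite | github.com/jeurtr/Spark | road_etl.py | uniq_map
-- ===== SOURCE A (Python) =====
-- start_index = 2    # 开始时间字段，整型
--
-- end_index = 3      # 结束时间字段，整型
--
-- station_index = 4  # 基站字段（经过格式化的）
--
-- def uniq_map(data):
--     """去重：相同的开始时间，相同的基站，结束时间只保留最大的一个"""
--     uniq_dict = {}
--     for i in data:
--         key = (i[start_index], i[station_index])
--         if key not in uniq_dict:
--             uniq_dict[key] = i
--         elif i[end_index] > uniq_dict[key][end_index]:
--             uniq_dict[key][end_index] = i[end_index]
--
--     return [uniq_dict[i] for i in uniq_dict]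
-- ===== SOURCE B (Python) =====
-- start_index = 2
--
-- end_index = 3
--
-- station_index = 4
--
-- def uniq_map(data):
--     """Group records by (start, station) in one pass, then reduce each group to its
--     first-seen record carrying the group's maximum end time."""
--     groups = {}
--     for i in data:
--         groups.setdefault((i[start_index], i[station_index]), []).append(i)
--     out = []
--     for recs in groups.values():
--         m = max(r[end_index] for r in recs)
--         recs[0][end_index] = m
--         out.append(recs[0])
--     return out
-- ===== Notes on version B (the rewrite author's own statement) =====
-- stated objective: alternative
-- what changed: A keeps one running-max record per key updated in place during a single dict pass; B first groups whole records into lists per (start, station) key with setdefault/append, then in a second pass reduces each group by computing max(end) and writing it into the group's first record.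
import Mathlib
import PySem

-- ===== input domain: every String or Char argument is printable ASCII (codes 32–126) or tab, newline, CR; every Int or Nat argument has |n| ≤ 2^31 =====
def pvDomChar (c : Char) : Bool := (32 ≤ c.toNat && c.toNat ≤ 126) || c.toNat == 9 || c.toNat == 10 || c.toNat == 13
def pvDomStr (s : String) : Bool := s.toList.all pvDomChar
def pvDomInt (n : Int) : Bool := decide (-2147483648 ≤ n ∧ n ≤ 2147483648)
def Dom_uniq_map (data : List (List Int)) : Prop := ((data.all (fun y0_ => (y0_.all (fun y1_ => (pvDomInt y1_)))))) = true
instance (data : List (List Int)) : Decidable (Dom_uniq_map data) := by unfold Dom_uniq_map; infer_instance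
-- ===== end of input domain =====

-- B groups whole records per (start, station) key and reduces each group to its first record
-- carrying the group's max end-time in a second pass, instead of A's single-pass running-max update;
-- equivalence is about the RETURN value (in Python both mutate the first-seen record's end field in place, to the same final state).


-- ===== PORT A =====
-- loop body of A: key = (i[2], i[4]); first occurrence stored, later ones only raise the stored end field
def stepA (d : PySem.Dict (Int × Int) (List Int)) (i : List Int) : PySem.Dict (Int × Int) (List Int) :=
  let key : Int × Int := (PySem.List.pyGetD i 2 0, PySem.List.pyGetD i 4 0)
  if d.contains key = false then d.insert key i
  else if PySem.List.pyGetD (d.getD key []) 3 0 < PySem.List.pyGetD i 3 0 then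
    d.insert key ((d.getD key []).set 3 (PySem.List.pyGetD i 3 0))
  else d

def uniq_map (data : List (List Int)) : List (List Int) :=
  (data.foldl stepA PySem.Dict.empty).values

-- ===== PORT B =====
-- loop body of B's first pass: groups.setdefault(key, []).append(i)
def stepB (g : PySem.Dict (Int × Int) (List (List Int))) (i : List Int) :
    PySem.Dict (Int × Int) (List (List Int)) :=
  g.modify (PySem.List.pyGetD i 2 0, PySem.List.pyGetD i 4 0) [] (· ++ [i])

-- B's second pass per group: m = max(r[3] for r in recs); recs[0] with end field m
def bReduce (recs : List (List Int)) : List Int :=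
  match recs with
  | [] => []
  | r :: rs =>
    r.set 3 ((PySem.List.max? ((r :: rs).map (fun x => PySem.List.pyGetD x 3 0)) id).getD 0)

def uniq_map_alt (data : List (List Int)) : List (List Int) :=
  let groups := data.foldl stepB PySem.Dict.empty
  groups.values.foldl (fun out recs => out ++ [bReduce recs]) []

-- ===== PRECONDITION & SPEC =====
-- Pre_ excludes exactly the inputs on which Python A raises IndexError: a record shorter than 5
-- has no i[4] (or i[3]/i[2]).
def Pre_uniq_map (data : List (List Int)) : Prop := ∀ i ∈ data, 5 ≤ i.length
instance (data : List (List Int)) : Decidable (Pre_uniq_map data) := by unfold Pre_uniq_map; infer_instance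

def pvWitness_uniq_map : List (List Int) := [[0, 0, 1, 2, 3], [0, 0, 1, 5, 3], [1, 1, 2, 2, 2]]

def Spec_uniq_map (data : List (List Int)) (out : List (List Int)) : Prop := out = uniq_map_alt data
instance (data : List (List Int)) (out : List (List Int)) : Decidable (Spec_uniq_map data out) := by unfold Spec_uniq_map; infer_instance

-- ===== CLAIM (what is proved, stated in full; the proofs are below) =====
def Claim_equal_uniq_map : Prop := ∀ (data : List (List Int)), Dom_uniq_map data → Pre_uniq_map data → Spec_uniq_map data (uniq_map data)

-- ===== LEMMAS AND PROOFS =====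

-- the end field of a record
def eEnd (i : List Int) : Int := PySem.List.pyGetD i 3 0

-- running max as B's max? computes it on a nonempty list
def runMax (a : Int) (l : List Int) : Int := l.foldl (fun m x => if m < x then x else m) a

theorem max?_cons_getD (a : Int) (l : List Int) :
    (PySem.List.max? (a :: l) id).getD 0 = runMax a l := by
  suffices h : ∀ (l : List Int) (a : Int),
      PySem.List.max? (a :: l) (id : Int → Int) = some (runMax a l) by
    rw [h]; rfl
  intro l
  induction l with
  | nil => intro a; rfl
  | cons x xs ih =>
    intro a
    show List.foldl _ (some a) (x :: xs) = _
    simp only [List.foldl_cons]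
    have : (if (id a : Int) < id x then some x else some a)
        = some (if a < x then x else a) := by split <;> simp_all
    rw [this]
    exact ih _

theorem bReduce_cons (r : List Int) (rs : List (List Int)) :
    bReduce (r :: rs) = r.set 3 (runMax (eEnd r) (rs.map eEnd)) := by
  show r.set 3 ((PySem.List.max? ((r :: rs).map eEnd) id).getD 0) = _
  rw [List.map_cons, max?_cons_getD]

theorem runMax_append (a : Int) (l : List Int) (x : Int) :
    runMax a (l ++ [x]) = if runMax a l < x then x else runMax a l := by
  simp [runMax, List.foldl_append]

theorem eEnd_set (r : List Int) (m : Int) (h : 5 ≤ r.length) :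
    eEnd (r.set 3 m) = m := by
  have h3 : (3 : Int) < ((r.set 3 m).length : Int) := by simp; omega
  rw [eEnd, PySem.List.pyGetD_eq_getElem _ _ (by norm_num) h3]
  simp

theorem set_eEnd_self (r : List Int) (h : 5 ≤ r.length) : r.set 3 (eEnd r) = r := by
  have h3 : (3 : Int) < (r.length : Int) := by omega
  rw [eEnd, PySem.List.pyGetD_eq_getElem _ _ (by norm_num) h3]
  exact List.set_getElem_self (by omega)

def mapF (p : (Int × Int) × List (List Int)) : (Int × Int) × List Int := (p.1, bReduce p.2)

def keyOf (i : List Int) : Int × Int := (PySem.List.pyGetD i 2 0, PySem.List.pyGetD i 4 0)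

def DInv (g : PySem.Dict (Int × Int) (List (List Int))) : Prop :=
  (∀ p ∈ g.items, ∃ r rs, p.2 = r :: rs ∧ 5 ≤ r.length) ∧ g.keys.Nodup

theorem get?_mapF (lb : List ((Int × Int) × List (List Int))) (k : Int × Int) :
    (PySem.Dict.mk (lb.map mapF)).get? k = ((PySem.Dict.mk lb).get? k).map bReduce := by
  simp [PySem.Dict.get?, List.find?_map, Function.comp_def, mapF, Option.map_map]

theorem contains_mapF (lb : List ((Int × Int) × List (List Int))) (k : Int × Int) :
    (PySem.Dict.mk (lb.map mapF)).contains k = (PySem.Dict.mk lb).contains k := by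
  simp [PySem.Dict.contains, List.any_map, Function.comp_def, mapF]

theorem insert_mapF (lb : List ((Int × Int) × List (List Int))) (k : Int × Int)
    (v : List (List Int)) :
    (PySem.Dict.mk (lb.map mapF)).insert k (bReduce v)
      = PySem.Dict.mk ((((PySem.Dict.mk lb).insert k v).items).map mapF) := by
  apply PySem.Dict.ext
  simp only [PySem.Dict.insert, contains_mapF]
  split
  · simp only [List.map_map]
    apply List.map_congr_left
    intro p _
    by_cases h : p.1 = k
    · simp [mapF, h]
    · simp [mapF, h]
  · simp [mapF]

theorem insert_get?_self (d : PySem.Dict (Int × Int) (List Int)) (k : Int × Int)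
    (w : List Int) (hnd : d.keys.Nodup) (hg : d.get? k = some w) :
    d.insert k w = d := by
  have hmem : (k, w) ∈ d.items := PySem.Dict.mem_items_of_get?_eq_some d hg
  have hc : d.contains k = true := by
    rw [PySem.Dict.contains_eq_isSome_get?, hg]; rfl
  apply PySem.Dict.ext
  simp only [PySem.Dict.insert, hc, if_pos]
  show List.map _ d.items = d.items
  conv_rhs => rw [← List.map_id d.items]
  apply List.map_congr_left
  intro p hp
  by_cases h : p.1 = k
  · -- unique key: p must be (k, w)
    have : p = (k, w) := by
      have hnd' : (d.items.map Prod.fst).Nodup := hnd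
      have := List.inj_on_of_nodup_map hnd' hp hmem (by simp [h])
      exact this
    simp [this]
  · simp [h]

theorem stepB_eq (g : PySem.Dict (Int × Int) (List (List Int))) (i : List Int) :
    stepB g i = g.insert (keyOf i) (g.getD (keyOf i) [] ++ [i]) := rfl

theorem dinv_stepB (g : PySem.Dict (Int × Int) (List (List Int))) (i : List Int)
    (hInv : DInv g) (hi : 5 ≤ i.length) : DInv (stepB g i) := by
  obtain ⟨hval, hnd⟩ := hInv
  rw [stepB_eq]
  constructor
  · intro p hp
    rw [PySem.Dict.mem_items_insert] at hp
    rcases hp with hp | ⟨hp, _⟩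
    · subst hp
      rcases hcg : g.get? (keyOf i) with _ | v
      · refine ⟨i, [], ?_, hi⟩
        simp [PySem.Dict.getD_eq_get?_getD, hcg]
      · obtain ⟨r, rs, hv, hr⟩ := hval _ (PySem.Dict.mem_items_of_get?_eq_some g hcg)
        have hv' : v = r :: rs := hv
        refine ⟨r, rs ++ [i], ?_, hr⟩
        simp [PySem.Dict.getD_eq_get?_getD, hcg, hv']
    · exact hval _ hp
  · exact PySem.Dict.nodup_keys_insert _ _ _ hnd

theorem nodup_keys_mapF (lb : List ((Int × Int) × List (List Int)))
    (h : (PySem.Dict.mk lb).keys.Nodup) : (PySem.Dict.mk (lb.map mapF)).keys.Nodup := by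
  have : (PySem.Dict.mk (lb.map mapF)).keys = (PySem.Dict.mk lb).keys := by
    simp [PySem.Dict.keys, List.map_map, Function.comp_def, mapF]
  rw [this]; exact h

theorem stepA_mapF (g : PySem.Dict (Int × Int) (List (List Int))) (i : List Int)
    (hInv : DInv g) (hi : 5 ≤ i.length) :
    stepA (PySem.Dict.mk (g.items.map mapF)) i
      = PySem.Dict.mk (((stepB g i).items).map mapF) := by
  obtain ⟨hval, hnd⟩ := hInv
  obtain ⟨lb⟩ := g
  have hstepA : stepA (PySem.Dict.mk (lb.map mapF)) i
      = if (PySem.Dict.mk (lb.map mapF)).contains (keyOf i) = false then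
          (PySem.Dict.mk (lb.map mapF)).insert (keyOf i) i
        else if PySem.List.pyGetD ((PySem.Dict.mk (lb.map mapF)).getD (keyOf i) []) 3 0
            < PySem.List.pyGetD i 3 0 then
          (PySem.Dict.mk (lb.map mapF)).insert (keyOf i)
            (((PySem.Dict.mk (lb.map mapF)).getD (keyOf i) []).set 3 (PySem.List.pyGetD i 3 0))
        else PySem.Dict.mk (lb.map mapF) := rfl
  rcases hcg : (PySem.Dict.mk lb).get? (keyOf i) with _ | v
  · -- fresh key
    have hc : (PySem.Dict.mk lb).contains (keyOf i) = false := by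
      rw [PySem.Dict.contains_eq_isSome_get?, hcg]; rfl
    have hcA : (PySem.Dict.mk (lb.map mapF)).contains (keyOf i) = false := by
      rw [contains_mapF]; exact hc
    have hred : bReduce [i] = i := by
      rw [bReduce_cons i []]
      simp only [List.map_nil, runMax, List.foldl_nil]
      exact set_eEnd_self i hi
    rw [hstepA, if_pos hcA, stepB_eq, PySem.Dict.getD_eq_get?_getD, hcg]
    simp only [Option.getD_none, List.nil_append]
    rw [← insert_mapF, hred]
  · -- existing key
    obtain ⟨r, rs, hv, hr⟩ := hval _ (PySem.Dict.mem_items_of_get?_eq_some _ hcg)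
    have hv' : v = r :: rs := hv
    subst hv'
    have hc : (PySem.Dict.mk lb).contains (keyOf i) = true := by
      rw [PySem.Dict.contains_eq_isSome_get?, hcg]; rfl
    have hcA : ¬ ((PySem.Dict.mk (lb.map mapF)).contains (keyOf i) = false) := by
      rw [contains_mapF, hc]; simp
    have hgetA : (PySem.Dict.mk (lb.map mapF)).getD (keyOf i) [] = bReduce (r :: rs) := by
      rw [PySem.Dict.getD_eq_get?_getD, get?_mapF, hcg]; rfl
    have hgetB : (PySem.Dict.mk lb).getD (keyOf i) [] = r :: rs := by
      rw [PySem.Dict.getD_eq_get?_getD, hcg]; rfl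
    have hE : PySem.List.pyGetD (bReduce (r :: rs)) 3 0 = runMax (eEnd r) (rs.map eEnd) := by
      rw [bReduce_cons]; exact eEnd_set r _ hr
    have hEi : PySem.List.pyGetD i 3 0 = eEnd i := rfl
    have hredapp : bReduce (r :: (rs ++ [i]))
        = r.set 3 (if runMax (eEnd r) (rs.map eEnd) < eEnd i then eEnd i
                   else runMax (eEnd r) (rs.map eEnd)) := by
      rw [bReduce_cons]
      simp [runMax_append]
    rw [hstepA, if_neg hcA, hgetA, hE, hEi, stepB_eq, hgetB]
    by_cases hlt : runMax (eEnd r) (rs.map eEnd) < eEnd i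
    · -- A updates the stored end field
      rw [if_pos hlt]
      have hbr : (bReduce (r :: rs)).set 3 (eEnd i) = bReduce (r :: (rs ++ [i])) := by
        rw [bReduce_cons, List.set_set, hredapp, if_pos hlt]
      rw [hbr, show (r :: rs) ++ [i] = r :: (rs ++ [i]) from rfl, insert_mapF]
    · -- A keeps the stored record unchanged
      rw [if_neg hlt]
      have hsame : bReduce (r :: (rs ++ [i])) = bReduce (r :: rs) := by
        rw [hredapp, if_neg hlt, bReduce_cons]
      have hins := insert_mapF lb (keyOf i) (r :: (rs ++ [i]))
      rw [hsame] at hins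
      rw [show (r :: rs) ++ [i] = r :: (rs ++ [i]) from rfl, ← hins]
      symm
      apply insert_get?_self _ _ _ (nodup_keys_mapF lb hnd)
      rw [get?_mapF, hcg]; rfl

theorem foldEq (data : List (List Int)) :
    ∀ (g : PySem.Dict (Int × Int) (List (List Int))),
    (∀ i ∈ data, 5 ≤ i.length) → DInv g →
    data.foldl stepA (PySem.Dict.mk (g.items.map mapF))
      = PySem.Dict.mk (((data.foldl stepB g).items).map mapF) := by
  induction data with
  | nil => intro g _ _; rfl
  | cons i data ih =>
    intro g hpre hInv
    simp only [List.foldl_cons]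
    rw [stepA_mapF g i hInv (hpre i (by simp))]
    exact ih (stepB g i) (fun j hj => hpre j (by simp [hj]))
      (dinv_stepB g i hInv (hpre i (by simp)))

-- ===== VERDICT (by name: the statement is the Claim_ definition above) =====
theorem uniq_map_spec : Claim_equal_uniq_map := by
  intro data _ hpre
  show uniq_map data = uniq_map_alt data
  unfold uniq_map uniq_map_alt
  have h0 : DInv PySem.Dict.empty := by
    constructor
    · intro p hp; simp [PySem.Dict.empty] at hp
    · simp [PySem.Dict.empty, PySem.Dict.keys]
  have := foldEq data PySem.Dict.empty hpre h0
  rw [show (PySem.Dict.empty : PySem.Dict (Int × Int) (List Int))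
      = PySem.Dict.mk ((PySem.Dict.empty : PySem.Dict (Int × Int) (List (List Int))).items.map mapF) from rfl]
  rw [this]
  rw [PySem.List.foldl_append_singleton_eq_map]
  simp [PySem.Dict.values, List.map_map, Function.comp_def, mapF]
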